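-- pv_equiv track=rewrite | github.com/ReclaimLLM/RCLM | rclm/compress/filters/shell.py | _filter_listing
-- ===== SOURCE A (Python) =====
-- def _filter_listing(output: str) -> str:
--     """Compress directory listings: group by directory, show counts."""
--     if not output.strip():
--         return "(empty)"
--
--     lines = [line.rstrip() for line in output.splitlines() if line.strip()]
--
--     if len(lines) <= 30:
--         return output  # Small enough, keep as-is
--
--     # Group files by parent directory
--     dirs: dict[str, list[str]] = {}
--     plain_files: list[str] = []
--
--     for line in lines:
--         # Skip header/summary lines from ls -l
--         if line.startswith("total ") or line.startswith("d") or line.startswith("-"):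
--             plain_files.append(line)
--             continue
--
--         parts = line.rsplit("/", 1)
--         if len(parts) == 2:
--             parent, name = parts
--             dirs.setdefault(parent, []).append(name)
--         else:
--             plain_files.append(line)
--
--     if not dirs:
--         # No directory structure found, just truncate
--         return _truncate_lines(lines, 30)
--
--     result: list[str] = []
--     for parent, files in sorted(dirs.items()):
--         if len(files) <= 5:
--             for f in files:
--                 result.append(f"{parent}/{f}")
--         else:
--             result.append(f"{parent}/ ({len(files)} files)")
--             for f in files[:3]:
--                 result.append(f"  {f}")
--             result.append(f"  ... +{len(files) - 3} more")
--
--     if plain_files: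
--         result.extend(plain_files[:10])
--         if len(plain_files) > 10:
--             result.append(f"... +{len(plain_files) - 10} more files")
--
--     return "\n".join(result)
--
-- def _truncate_lines(lines: list[str], max_lines: int) -> str:
--     """Truncate a list of lines to max_lines with a count of omitted lines."""
--     if len(lines) <= max_lines:
--         return "\n".join(lines)
--     kept = lines[:max_lines]
--     kept.append(f"... ({len(lines) - max_lines} more lines)")
--     return "\n".join(kept)
-- ===== SOURCE B (Python) =====
-- def _filter_listing(output: str) -> str:
--     """Compress directory listings: group by directory, show counts."""
--     if not output.strip():
--         return "(empty)"
--
--     lines = [line.rstrip() for line in output.splitlines() if line.strip()]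
--
--     if len(lines) <= 30:
--         return output  # Small enough, keep as-is
--
--     plain_files = [line for line in lines if _is_plain(line)]
--     pathlike = [line for line in lines if not _is_plain(line)]
--
--     if not pathlike:
--         # No directory structure found, just truncate
--         return _truncate_lines(lines, 30)
--
--     pairs = [tuple(line.rsplit("/", 1)) for line in pathlike]
--     pairs.sort(key=lambda p: p[0])  # stable: original order kept inside each directory
--
--     # walk the sorted pairs run by run (two-pointer scan)
--     groups: list[tuple[str, list[str]]] = []
--     rest = pairs
--     while rest:
--         parent = rest[0][0]
--         k = 1
--         while k < len(rest) and rest[k][0] == parent: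
--             k += 1
--         groups.append((parent, [name for _, name in rest[:k]]))
--         rest = rest[k:]
--
--     result = [line for parent, files in groups for line in _render_group(parent, files)]
--     result += plain_files[:10]
--     if len(plain_files) > 10:
--         result.append(f"... +{len(plain_files) - 10} more files")
--
--     return "\n".join(result)
--
--
-- def _is_plain(line: str) -> bool:
--     return line.startswith(("total ", "d", "-")) or "/" not in line
--
--
-- def _render_group(parent: str, files: list[str]) -> list[str]:
--     if len(files) <= 5:
--         return [f"{parent}/{f}" for f in files]
--     return ([f"{parent}/ ({len(files)} files)"]
--             + [f"  {f}" for f in files[:3]]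
--             + [f"  ... +{len(files) - 3} more"])
--
--
-- def _truncate_lines(lines: list[str], max_lines: int) -> str:
--     """Truncate a list of lines to max_lines with a count of omitted lines."""
--     if len(lines) <= max_lines:
--         return "\n".join(lines)
--     return "\n".join(lines[:max_lines]) + f"\n... ({len(lines) - max_lines} more lines)"
-- ===== Notes on version B (the rewrite author's own statement) =====
-- stated objective: alternative
-- what changed: Replaces A's dict-of-lists accumulation and sorted(dict.items()) with staged passes: two filtering comprehensions split plain lines from (parent, name) pairs, the pairs are stable-sorted by parent once, and a two-pointer run scan over the sorted pairs emits each directory group.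
import Mathlib
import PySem

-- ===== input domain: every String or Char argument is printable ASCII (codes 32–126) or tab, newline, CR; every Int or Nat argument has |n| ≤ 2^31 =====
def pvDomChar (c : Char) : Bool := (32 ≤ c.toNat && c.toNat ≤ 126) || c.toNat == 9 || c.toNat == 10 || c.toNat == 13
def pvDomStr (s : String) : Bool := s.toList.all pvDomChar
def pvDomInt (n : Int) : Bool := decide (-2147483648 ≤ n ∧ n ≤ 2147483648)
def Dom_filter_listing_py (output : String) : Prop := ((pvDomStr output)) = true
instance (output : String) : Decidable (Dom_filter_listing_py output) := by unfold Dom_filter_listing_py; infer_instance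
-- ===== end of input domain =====

-- B replaces A's dict-of-lists accumulation and sorted(dict.items()) by staged passes:
-- two filtering comprehensions, one stable sort of (parent, name) pairs by parent, and a
-- two-pointer run scan over the sorted pairs; alternative decomposition, same results.

-- ===== PORT A =====
-- index of the LAST '/' in the line (the scan str.rsplit("/", 1) performs); none = no '/' present
def pvLastSlash? : List Char → Option Nat
  | [] => none
  | c :: rest =>
    match pvLastSlash? rest with
    | some i => some (i + 1)
    | none => if c = '/' then some 0 else none

-- _truncate_lines, as A writes it (kept = lines[:max]; kept.append(…); join)
def pvTruncateA (lines : List (List Char)) (maxLines : Nat) : List Char :=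
  if lines.length ≤ maxLines then PySem.Chars.join ['\n'] lines
  else
    let kept := lines.take maxLines
    let kept := kept ++ ["... (".toList ++ PySem.Int.toChars ((lines.length : Int) - (maxLines : Int)) ++ " more lines)".toList]
    PySem.Chars.join ['\n'] kept

-- one iteration of A's classification loop over (dirs, plain_files)
def pvStepA (st : PySem.Dict (List Char) (List (List Char)) × List (List Char)) (line : List Char) :
    PySem.Dict (List Char) (List (List Char)) × List (List Char) :=
  if PySem.Chars.startswith line "total ".toList || PySem.Chars.startswith line "d".toList
      || PySem.Chars.startswith line "-".toList then
    (st.1, st.2 ++ [line])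
  else
    -- parts = line.rsplit("/", 1): two parts exactly when a '/' occurs
    match pvLastSlash? line with
    | some i => (st.1.modify (line.take i) [] (· ++ [line.drop (i + 1)]), st.2)  -- dirs.setdefault(parent, []).append(name)
    | none => (st.1, st.2 ++ [line])

-- body of A's emission loop over sorted(dirs.items())
def pvEmitA (res : List (List Char)) (pf : List Char × List (List Char)) : List (List Char) :=
  if pf.2.length ≤ 5 then
    pf.2.foldl (fun r f => r ++ [pf.1 ++ '/' :: f]) res
  else
    let r := res ++ [pf.1 ++ "/ (".toList ++ PySem.Int.toChars (pf.2.length : Int) ++ " files)".toList]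
    let r := (pf.2.take 3).foldl (fun r f => r ++ ["  ".toList ++ f]) r
    r ++ ["  ... +".toList ++ PySem.Int.toChars ((pf.2.length : Int) - 3) ++ " more".toList]

def filter_listing_py (output : String) : String :=
  if (PySem.Chars.strip output.toList).isEmpty then "(empty)"
  else
    let lines := ((PySem.Chars.splitlines output.toList).filter
        (fun l => !(PySem.Chars.strip l).isEmpty)).map PySem.Chars.rstrip
    if lines.length ≤ 30 then output
    else
      let acc := lines.foldl pvStepA (PySem.Dict.empty, [])
      if acc.1.items.isEmpty then String.ofList (pvTruncateA lines 30)
      else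
        -- sorted(dirs.items()): keys are distinct, so Python's tuple sort is exactly the sort by key
        let result := (PySem.List.sorted acc.1.items (fun p => p.1)).foldl pvEmitA []
        let result := if !acc.2.isEmpty then
            (result ++ acc.2.take 10) ++
              (if acc.2.length > 10 then
                ["... +".toList ++ PySem.Int.toChars ((acc.2.length : Int) - 10) ++ " more files".toList]
              else [])
          else result
        String.ofList (PySem.Chars.join ['\n'] result)

-- ===== PORT B =====
-- _is_plain: header/summary line, or no '/' in it
def pvIsPlain (l : List Char) : Bool :=
  PySem.Chars.startswith l "total ".toList || PySem.Chars.startswith l "d".toList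
    || PySem.Chars.startswith l "-".toList || !(PySem.Chars.isIn ['/'] l)

-- tuple(line.rsplit("/", 1)): scan from the right for the separator, as rsplit does;
-- the no-'/' branch is unreachable (callers pass lines with a '/')
def pvRSplit2 (l : List Char) : List Char × List Char :=
  let name := (l.reverse.takeWhile (fun c => c != '/')).reverse
  if name.length = l.length then (l, [])
  else (l.take (l.length - name.length - 1), name)

-- the two-pointer run scan over the sorted pairs: each run of equal parents becomes one group
def pvGroups : List (List Char × List Char) → List (List Char × List (List Char))
  | [] => []
  | p :: t =>
    (p.1, p.2 :: (t.takeWhile (fun q => q.1 == p.1)).map (fun q => q.2)) ::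
      pvGroups (t.dropWhile (fun q => q.1 == p.1))
termination_by l => l.length
decreasing_by
  exact Nat.lt_succ_of_le (List.length_dropWhile_le _ t)

-- _render_group
def pvRender (parent : List Char) (files : List (List Char)) : List (List Char) :=
  if files.length ≤ 5 then files.map (fun f => parent ++ '/' :: f)
  else
    ([parent ++ "/ (".toList ++ PySem.Int.toChars (files.length : Int) ++ " files)".toList]
        ++ (files.take 3).map (fun f => "  ".toList ++ f))
      ++ ["  ... +".toList ++ PySem.Int.toChars ((files.length : Int) - 3) ++ " more".toList]

-- _truncate_lines, as Source B writes it ("\n".join(lines[:max]) + "\n... (…)")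
def pvTruncateB (lines : List (List Char)) (maxLines : Nat) : List Char :=
  if lines.length ≤ maxLines then PySem.Chars.join ['\n'] lines
  else
    PySem.Chars.join ['\n'] (lines.take maxLines)
      ++ '\n' :: ("... (".toList ++ PySem.Int.toChars ((lines.length : Int) - (maxLines : Int)) ++ " more lines)".toList)

def filter_listing_py_alt (output : String) : String :=
  if (PySem.Chars.strip output.toList).isEmpty then "(empty)"
  else
    let lines := ((PySem.Chars.splitlines output.toList).filter
        (fun l => !(PySem.Chars.strip l).isEmpty)).map PySem.Chars.rstrip
    if lines.length ≤ 30 then output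
    else
      let plain := lines.filter pvIsPlain
      let pathlike := lines.filter (fun l => !pvIsPlain l)
      if pathlike.isEmpty then String.ofList (pvTruncateB lines 30)
      else
        let pairs := pathlike.map pvRSplit2
        let groups := pvGroups (PySem.List.sorted pairs (fun p => p.1))
        let result := groups.flatMap (fun g => pvRender g.1 g.2)
        let result := result ++ plain.take 10 ++
            (if plain.length > 10 then
              ["... +".toList ++ PySem.Int.toChars ((plain.length : Int) - 10) ++ " more files".toList]
            else [])
        String.ofList (PySem.Chars.join ['\n'] result)

-- ===== PRECONDITION & SPEC =====
def Spec_filter_listing_py (output : String) (out : String) : Prop := out = filter_listing_py_alt output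
instance (output : String) (out : String) : Decidable (Spec_filter_listing_py output out) := by unfold Spec_filter_listing_py; infer_instance

-- ===== CLAIM (what is proved, stated in full; the proofs are below) =====
def Claim_equal_filter_listing_py : Prop := ∀ (output : String), Dom_filter_listing_py output → Spec_filter_listing_py output (filter_listing_py output)

-- ===== LEMMAS AND PROOFS =====

-- two PySem.List.sorted terms that differ only in the DecidableLT instance are equal
theorem pvSortedCongr {A K : Type} [inst : LT K] (i1 i2 : DecidableLT K) (xs : List A)
    (key : A -> K) (rev : Bool) :
    @PySem.List.sorted A K inst i1 xs key rev = @PySem.List.sorted A K inst i2 xs key rev :=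
  congrArg (fun i => @PySem.List.sorted A K inst i xs key rev) (Subsingleton.elim i1 i2)

theorem pvGroups_nil : pvGroups [] = [] := by simp [pvGroups]

theorem pvGroups_cons (p : List Char × List Char) (t : List (List Char × List Char)) :
    pvGroups (p :: t) =
      (p.1, p.2 :: (t.takeWhile (fun q => q.1 == p.1)).map (fun q => q.2)) ::
        pvGroups (t.dropWhile (fun q => q.1 == p.1)) := by
  rw [pvGroups.eq_def]

-- the pure classification A's loop computes: (pairs, plain_files)
def pvClassify : List (List Char) → List (List Char × List Char) × List (List Char)
  | [] => ([], [])
  | l :: t =>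
    let r := pvClassify t
    if PySem.Chars.startswith l "total ".toList || PySem.Chars.startswith l "d".toList
        || PySem.Chars.startswith l "-".toList then
      (r.1, l :: r.2)
    else
      match pvLastSlash? l with
      | some i => ((l.take i, l.drop (i + 1)) :: r.1, r.2)
      | none => (r.1, l :: r.2)

theorem pvLastSlash?_none_iff (l : List Char) : pvLastSlash? l = none ↔ '/' ∉ l := by
  induction l with
  | nil => simp [pvLastSlash?]
  | cons c rest ih =>
    cases h : pvLastSlash? rest with
    | some i =>
      have hm : '/' ∈ rest := by
        by_contra hx
        rw [ih.mpr hx] at h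
        simp at h
      simp only [pvLastSlash?, h]
      simp [hm]
    | none =>
      have hm : '/' ∉ rest := ih.mp h
      simp only [pvLastSlash?, h]
      by_cases hc : c = '/'
      · simp [hc]
      · simp [hm, Ne.symm hc, hc]

theorem pvLastSlash?_snoc (xs : List Char) (c : Char) :
    pvLastSlash? (xs ++ [c]) = if c = '/' then some xs.length else pvLastSlash? xs := by
  induction xs with
  | nil => simp [pvLastSlash?]
  | cons x t ih =>
    by_cases hc : c = '/'
    · subst hc
      simp [List.cons_append, pvLastSlash?, ih]
    · simp [List.cons_append, pvLastSlash?, ih, hc]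

theorem pvLastSlash?_lt (l : List Char) (i : Nat) (h : pvLastSlash? l = some i) :
    i < l.length := by
  induction l generalizing i with
  | nil => simp [pvLastSlash?] at h
  | cons c t ih =>
    cases ht : pvLastSlash? t with
    | some j =>
      have hji : i = j + 1 := by
        rw [pvLastSlash?, ht] at h
        exact (Option.some.inj h).symm
      have := ih j ht
      simp only [hji, List.length_cons]
      omega
    | none =>
      rw [pvLastSlash?, ht] at h
      by_cases hc : c = '/'
      · rw [if_pos hc] at h
        have : i = 0 := (Option.some.inj h).symm
        simp [this]
      · rw [if_neg hc] at h
        exact absurd h (by simp)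

theorem pvName_eq (l : List Char) :
    (l.reverse.takeWhile (fun c => c != '/')).reverse
      = match pvLastSlash? l with
        | some i => l.drop (i + 1)
        | none => l := by
  induction l using List.reverseRecOn with
  | nil => simp [pvLastSlash?]
  | append_singleton xs c ih =>
    rw [pvLastSlash?_snoc]
    by_cases hc : c = '/'
    · subst hc
      rw [if_pos rfl, List.reverse_append]
      have h1 : List.takeWhile (fun c => c != '/') ('/' :: xs.reverse) = [] := by
        rw [List.takeWhile_cons]; simp
      simp only [List.reverse_singleton, List.singleton_append, h1, List.reverse_nil]
      have h2 : (xs ++ ['/']).length = xs.length + 1 := by simp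
      rw [show xs.length + 1 = (xs ++ ['/']).length from h2.symm, List.drop_length]
    · rw [if_neg hc, List.reverse_append]
      have hcb : (c != '/') = true := by simp [hc]
      simp only [List.reverse_singleton, List.singleton_append]
      rw [show List.takeWhile (fun c => c != '/') (c :: xs.reverse)
            = c :: List.takeWhile (fun c => c != '/') xs.reverse from by
          rw [List.takeWhile_cons]; simp [hcb],
        List.reverse_cons, ih]
      cases h : pvLastSlash? xs with
      | some i =>
        have hi := pvLastSlash?_lt xs i h
        show List.drop (i + 1) xs ++ [c] = List.drop (i + 1) (xs ++ [c])
        rw [List.drop_append_of_le_length (by omega)]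
      | none => rfl

theorem pvRSplit2_eq (l : List Char) :
    pvRSplit2 l = match pvLastSlash? l with
      | some i => (l.take i, l.drop (i + 1))
      | none => (l, []) := by
  simp only [pvRSplit2, pvName_eq]
  cases h : pvLastSlash? l with
  | none => simp
  | some i =>
    have hi := pvLastSlash?_lt l i h
    have hlen : (l.drop (i + 1)).length = l.length - (i + 1) := List.length_drop
    rw [if_neg (by rw [hlen]; omega)]
    have harith : l.length - (l.drop (i + 1)).length - 1 = i := by rw [hlen]; omega
    rw [harith]

theorem pvIsPlain_eq (l : List Char) :
    pvIsPlain l =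
      (PySem.Chars.startswith l "total ".toList || PySem.Chars.startswith l "d".toList
        || PySem.Chars.startswith l "-".toList || (pvLastSlash? l).isNone) := by
  unfold pvIsPlain
  congr 1
  cases h : pvLastSlash? l with
  | some i =>
    have hm : '/' ∈ l := by
      by_contra hx
      rw [(pvLastSlash?_none_iff l).mpr hx] at h
      simp at h
    have : PySem.Chars.isIn ['/'] l = true :=
      (PySem.Chars.isIn_iff_infix _ _).mpr ((List.singleton_infix_iff '/' l).mpr hm)
    simp [this]
  | none =>
    have hm : '/' ∉ l := (pvLastSlash?_none_iff l).mp h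
    have : PySem.Chars.isIn ['/'] l = false :=
      (PySem.Chars.isIn_eq_false_iff _ _).mpr (fun hin => hm ((List.singleton_infix_iff '/' l).mp hin))
    simp [this]

theorem pvClassify_snd (ls : List (List Char)) : (pvClassify ls).2 = ls.filter pvIsPlain := by
  induction ls with
  | nil => simp [pvClassify]
  | cons l t ih =>
    simp only [pvClassify]
    rw [List.filter_cons]
    by_cases hs : (PySem.Chars.startswith l "total ".toList || PySem.Chars.startswith l "d".toList
        || PySem.Chars.startswith l "-".toList) = true
    · have hp : pvIsPlain l = true := by rw [pvIsPlain_eq, hs]; rfl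
      rw [if_pos hs]
      simp [hp, ih]
    · have hsf : (PySem.Chars.startswith l "total ".toList || PySem.Chars.startswith l "d".toList
          || PySem.Chars.startswith l "-".toList) = false := by simpa using hs
      cases h : pvLastSlash? l with
      | some i =>
        have hp : pvIsPlain l = false := by rw [pvIsPlain_eq, hsf, h]; rfl
        rw [if_neg (by rw [hsf]; simp)]
        simp [hp, ih]
      | none =>
        have hp : pvIsPlain l = true := by rw [pvIsPlain_eq, hsf, h]; rfl
        rw [if_neg (by rw [hsf]; simp)]
        simp [hp, ih]

theorem pvClassify_fst (ls : List (List Char)) :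
    (pvClassify ls).1 = (ls.filter (fun l => !pvIsPlain l)).map pvRSplit2 := by
  induction ls with
  | nil => simp [pvClassify]
  | cons l t ih =>
    simp only [pvClassify]
    rw [List.filter_cons]
    by_cases hs : (PySem.Chars.startswith l "total ".toList || PySem.Chars.startswith l "d".toList
        || PySem.Chars.startswith l "-".toList) = true
    · have hp : pvIsPlain l = true := by rw [pvIsPlain_eq, hs]; rfl
      rw [if_pos hs]
      simp [hp, ih]
    · have hsf : (PySem.Chars.startswith l "total ".toList || PySem.Chars.startswith l "d".toList
          || PySem.Chars.startswith l "-".toList) = false := by simpa using hs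
      cases h : pvLastSlash? l with
      | some i =>
        have hp : pvIsPlain l = false := by rw [pvIsPlain_eq, hsf, h]; rfl
        have hr : pvRSplit2 l = (l.take i, l.drop (i + 1)) := by rw [pvRSplit2_eq, h]
        rw [if_neg (by rw [hsf]; simp)]
        simp [hp, ih, hr]
      | none =>
        have hp : pvIsPlain l = true := by rw [pvIsPlain_eq, hsf, h]; rfl
        rw [if_neg (by rw [hsf]; simp)]
        simp [hp, ih]

theorem pvStepA_eq (ls : List (List Char)) :
    ∀ (d : PySem.Dict (List Char) (List (List Char))) pl,
    ls.foldl pvStepA (d, pl) =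
      ((pvClassify ls).1.foldl (fun d p => d.modify p.1 [] (· ++ [p.2])) d,
        pl ++ (pvClassify ls).2) := by
  induction ls with
  | nil => intro d pl; simp [pvClassify]
  | cons l t ih =>
    intro d pl
    have e : ∀ (q : PySem.Dict (List Char) (List (List Char)) × List (List Char)),
        List.foldl pvStepA q t =
          ((pvClassify t).1.foldl (fun d p => d.modify p.1 [] (· ++ [p.2])) q.1,
            q.2 ++ (pvClassify t).2) :=
      fun q => by rw [← Prod.mk.eta (p := q)]; exact ih q.1 q.2
    simp only [List.foldl_cons, e]
    cases h : pvLastSlash? l <;>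
      simp only [pvStepA, pvClassify, h] <;> split_ifs <;> simp_all [List.foldl_cons]

-- stability of PySem's insertion sort, per key class
theorem pvFilter_insertBy (x : List Char × List Char) (k : List Char)
    (acc : List (List Char × List Char)) (h : acc.Pairwise (fun a b => a.1 ≤ b.1)) :
    (PySem.List.insertBy (fun a b => decide (a.1 < b.1)) x acc).filter (fun q => q.1 == k)
      = if x.1 == k then acc.filter (fun q => q.1 == k) ++ [x]
        else acc.filter (fun q => q.1 == k) := by
  induction acc with
  | nil => by_cases hk : x.1 == k <;> simp [PySem.List.insertBy, hk]
  | cons y ys ih =>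
    rcases List.pairwise_cons.mp h with ⟨hy, hys⟩
    by_cases hlt : x.1 < y.1
    · simp only [PySem.List.insertBy, hlt, decide_true, if_true]
      by_cases hk : (x.1 == k) = true
      · have hkk : x.1 = k := by simpa using hk
        have hnil : (y :: ys).filter (fun q => q.1 == k) = [] := by
          rw [List.filter_eq_nil_iff]
          intro q hq
          have h1 : y.1 ≤ q.1 := by
            rcases List.mem_cons.mp hq with hq' | hq'
            · rw [hq']
            · exact hy q hq'
          have h2 : k < q.1 := lt_of_lt_of_le (hkk ▸ hlt) h1
          simp only [beq_iff_eq]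
          exact fun hqe => absurd (hqe ▸ h2) (lt_irrefl _)
        rw [List.filter_cons, hnil]
        simp [hk]
      · rw [List.filter_cons]
        simp [hk]
    · simp only [PySem.List.insertBy, hlt, decide_false, Bool.false_eq_true, if_false]
      rw [List.filter_cons, ih hys]
      by_cases hk : (x.1 == k) = true <;> by_cases hyk : (y.1 == k) = true <;>
        simp [hk, hyk]

theorem pvSorted_filter_key (ps : List (List Char × List Char)) (k : List Char) :
    (PySem.List.sorted ps (fun p => p.1)).filter (fun q => q.1 == k)
      = ps.filter (fun q => q.1 == k) := by
  induction ps using List.reverseRecOn with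
  | nil => simp [PySem.List.sorted_eq_foldl_insertBy]
  | append_singleton ps x ih =>
    have hpw : (PySem.List.sorted ps (fun p => p.1)).Pairwise (fun a b => a.1 ≤ b.1) := by
      rw [pvSortedCongr _ LinearOrder.toDecidableLT]
      exact PySem.List.sorted_pairwise ps (fun p => p.1)
    have hstep : PySem.List.sorted (ps ++ [x]) (fun p => p.1)
        = PySem.List.insertBy (fun a b => decide (a.1 < b.1)) x
            (PySem.List.sorted ps (fun p => p.1)) := by
      rw [PySem.List.sorted_eq_foldl_insertBy, PySem.List.sorted_eq_foldl_insertBy,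
        List.foldl_append, List.foldl_cons, List.foldl_nil]
    rw [hstep, pvFilter_insertBy x k _ hpw, ih, List.filter_append, List.filter_cons,
      List.filter_nil]
    by_cases hk : (x.1 == k) = true <;> simp [hk]

-- helper for the run scan: on a key-sorted tail whose keys are all ≥ k,
-- takeWhile (== k) is filter (== k) and everything dropped has key > k
theorem pvRun_spec (k : List Char) :
    ∀ (t : List (List Char × List Char)), t.Pairwise (fun a b => a.1 ≤ b.1) →
    (∀ q ∈ t, k ≤ q.1) →
    t.takeWhile (fun q => q.1 == k) = t.filter (fun q => q.1 == k)
      ∧ ∀ q ∈ t.dropWhile (fun q => q.1 == k), k < q.1 := by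
  intro t
  induction t with
  | nil => intro _ _; exact ⟨rfl, by simp⟩
  | cons y ys ih =>
    intro hpw hge
    rcases List.pairwise_cons.mp hpw with ⟨hy, hys⟩
    by_cases hyk : (y.1 == k) = true
    · have hyk' : y.1 = k := by simpa using hyk
      rcases ih hys (fun q hq => hyk' ▸ hy q hq) with ⟨h1, h2⟩
      refine ⟨?_, ?_⟩
      · rw [show List.takeWhile (fun q => q.1 == k) (y :: ys)
              = y :: List.takeWhile (fun q => q.1 == k) ys from by
            rw [List.takeWhile_cons]; simp [hyk],
          List.filter_cons, h1]
        simp [hyk]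
      · rw [show List.dropWhile (fun q => q.1 == k) (y :: ys)
              = List.dropWhile (fun q => q.1 == k) ys from by
            rw [List.dropWhile_cons]; simp [hyk]]
        exact h2
    · have hky : k < y.1 := by
        rcases lt_or_eq_of_le (hge y (by simp)) with h | h
        · exact h
        · exact absurd (by simp [h.symm]) hyk
      have hnil : ys.filter (fun q => q.1 == k) = [] := by
        rw [List.filter_eq_nil_iff]
        intro q hq
        have h2 : k < q.1 := lt_of_lt_of_le hky (hy q hq)
        simp only [beq_iff_eq]
        exact fun hqe => absurd (hqe ▸ h2) (lt_irrefl _)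
      refine ⟨?_, ?_⟩
      · rw [show List.takeWhile (fun q => q.1 == k) (y :: ys) = [] from by
            rw [List.takeWhile_cons]; simp [hyk],
          List.filter_cons, hnil]
        simp [hyk]
      · rw [show List.dropWhile (fun q => q.1 == k) (y :: ys) = y :: ys from by
            rw [List.dropWhile_cons]; simp [hyk]]
        intro q hq
        rcases List.mem_cons.mp hq with hq' | hq'
        · rw [hq']; exact hky
        · exact lt_of_lt_of_le hky (hy q hq')

-- the run scan over a key-sorted pair list yields one group per distinct key,
-- in key order, each holding that key's class
theorem pvGroups_eq (ks : List (List Char)) :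
    ∀ (L : List (List Char × List Char)),
    ks.Pairwise (· < ·) →
    (∀ k, k ∈ ks ↔ k ∈ L.map Prod.fst) →
    L.Pairwise (fun a b => a.1 ≤ b.1) →
    pvGroups L = ks.map (fun k => (k, (L.filter (fun q => q.1 == k)).map (fun q => q.2))) := by
  induction ks with
  | nil =>
    intro L _ hmem _
    cases L with
    | nil => simp [pvGroups_nil]
    | cons p t => exact absurd ((hmem p.1).mpr (by simp)) (by simp)
  | cons k ks' ih =>
    intro L hks hmem hL
    rcases List.pairwise_cons.mp hks with ⟨hklt, hks'⟩
    cases L with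
    | nil => exact absurd ((hmem k).mp (by simp)) (by simp)
    | cons p t =>
      rcases List.pairwise_cons.mp hL with ⟨hp, ht⟩
      -- the head's key is k
      have hpk : p.1 = k := by
        rcases List.mem_map.mp ((hmem k).mp (by simp)) with ⟨q, hq, hqk⟩
        have hle : p.1 ≤ k := by
          rcases List.mem_cons.mp hq with hq' | hq'
          · rw [← hqk, hq']
          · exact hqk ▸ hp q hq'
        rcases List.mem_cons.mp ((hmem p.1).mpr (by simp)) with h' | h'
        · exact h'
        · exact absurd (lt_of_lt_of_le (hklt _ h') hle) (lt_irrefl _)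
      have hge : ∀ q ∈ t, k ≤ q.1 := fun q hq => hpk ▸ hp q hq
      rcases pvRun_spec k t ht hge with ⟨htake, hdrop⟩
      have hL' : (t.dropWhile (fun q => q.1 == k)).Pairwise (fun a b => a.1 ≤ b.1) :=
        List.Pairwise.sublist (List.dropWhile_sublist _) ht
      have hsplit : t.takeWhile (fun q => q.1 == k) ++ t.dropWhile (fun q => q.1 == k) = t :=
        List.takeWhile_append_dropWhile
      have htkkeys : ∀ q ∈ t.takeWhile (fun q => q.1 == k), q.1 = k := by
        intro q hq
        rw [htake] at hq
        simpa using (List.mem_filter.mp hq).2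
      have hmem' : ∀ k', k' ∈ ks' ↔ k' ∈ (t.dropWhile (fun q => q.1 == k)).map Prod.fst := by
        intro k'
        have hkne : k' ∈ ks' → k ≠ k' := fun hk' => ne_of_lt (hklt _ hk')
        constructor
        · intro hk'
          rcases List.mem_map.mp ((hmem k').mp (List.mem_cons_of_mem k hk')) with ⟨q, hq, hqk⟩
          have hqt : q ∈ t := by
            rcases List.mem_cons.mp hq with hq' | hq'
            · have hc : k = k' := by rw [← hqk, hq', hpk]
              exact absurd hc (hkne hk')
            · exact hq'
          rw [← hsplit] at hqt
          rcases List.mem_append.mp hqt with hq1 | hq2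
          · have hc : k = k' := by rw [← hqk, htkkeys q hq1]
            exact absurd hc (hkne hk')
          · exact List.mem_map.mpr ⟨q, hq2, hqk⟩
        · intro hk'
          rcases List.mem_map.mp hk' with ⟨q, hq, hqk⟩
          have hqt : q ∈ t := (List.dropWhile_sublist _).subset hq
          rcases List.mem_cons.mp ((hmem q.1).mpr
              (List.mem_map.mpr ⟨q, List.mem_cons_of_mem p hqt, rfl⟩)) with h' | h'
          · exact absurd (h' ▸ hdrop q hq) (lt_irrefl _)
          · exact hqk ▸ h'
      have hrec := ih (t.dropWhile (fun q => q.1 == k)) hks' hmem' hL'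
      have hfilt : ∀ k' ∈ ks',
          ((t.dropWhile (fun q => q.1 == k)).filter (fun q => q.1 == k')).map (fun q => q.2)
            = ((p :: t).filter (fun q => q.1 == k')).map (fun q => q.2) := by
        intro k' hk'
        have hkne : k ≠ k' := ne_of_lt (hklt _ hk')
        have hpne : (p.1 == k') = false := by
          simp only [beq_eq_false_iff_ne, ne_eq]
          rw [hpk]; exact hkne
        have htknil : (t.takeWhile (fun q => q.1 == k)).filter (fun q => q.1 == k') = [] := by
          rw [List.filter_eq_nil_iff]
          intro q hq
          simp only [beq_iff_eq]
          rw [htkkeys q hq]; exact hkne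
        have htf : t.filter (fun q => q.1 == k')
            = (t.dropWhile (fun q => q.1 == k)).filter (fun q => q.1 == k') := by
          conv_lhs => rw [← hsplit]
          rw [List.filter_append, htknil, List.nil_append]
        rw [show (p :: t).filter (fun q => q.1 == k')
              = t.filter (fun q => q.1 == k') from by rw [List.filter_cons]; simp [hpne], htf]
      rw [pvGroups_cons, hpk, hrec, List.map_cons]
      congr 1
      · have hhd : ((p :: t).filter (fun q => q.1 == k)).map (fun q => q.2)
            = p.2 :: (t.filter (fun q => q.1 == k)).map (fun q => q.2) := by
          rw [show (p :: t).filter (fun q => q.1 == k)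
                = p :: t.filter (fun q => q.1 == k) from by rw [List.filter_cons]; simp [hpk],
            List.map_cons]
        rw [hhd, ← htake]
      · exact (List.map_congr_left (fun k' hk' => by rw [hfilt k' hk'])).symm

-- A's emission loop body appends exactly B's rendered group
theorem pvEmitA_eq_render (res : List (List Char)) (g : List Char × List (List Char)) :
    pvEmitA res g = res ++ pvRender g.1 g.2 := by
  unfold pvEmitA pvRender
  split_ifs with h
  · rw [PySem.List.foldl_append_singleton_eq_map]
  · simp only [PySem.List.foldl_append_singleton_eq_map]
    simp [List.append_assoc]

theorem pvFoldl_emitA (items : List (List Char × List (List Char))) :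
    items.foldl pvEmitA [] = items.flatMap (fun g => pvRender g.1 g.2) := by
  rw [PySem.List.foldl_congr_mem _ pvEmitA (fun res g => res ++ pvRender g.1 g.2) []
    (fun res g _ => pvEmitA_eq_render res g)]
  rw [PySem.List.foldl_append_eq_flatMap, List.nil_append]

-- the two spellings of _truncate_lines agree
theorem pvJoin_append_singleton (sep t : List Char) :
    ∀ (xs : List (List Char)), xs ≠ [] →
    PySem.Chars.join sep (xs ++ [t]) = PySem.Chars.join sep xs ++ sep ++ t := by
  intro xs
  induction xs with
  | nil => intro h; exact absurd rfl h
  | cons x ys ih =>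
    intro _
    cases ys with
    | nil => simp [PySem.Chars.join, List.intercalate, List.append_assoc]
    | cons y zs =>
      have hih := ih (by simp)
      simp only [PySem.Chars.join, List.intercalate, List.cons_append] at hih ⊢
      rw [show List.intersperse sep (x :: y :: (zs ++ [t]))
            = x :: sep :: List.intersperse sep (y :: (zs ++ [t])) from by simp,
        show List.intersperse sep (x :: y :: zs)
            = x :: sep :: List.intersperse sep (y :: zs) from by simp]
      simp only [List.flatten_cons]
      rw [hih]
      simp [List.append_assoc]

theorem pvTruncate_eq (lines : List (List Char)) (maxLines : Nat) (hpos : 0 < maxLines) :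
    pvTruncateA lines maxLines = pvTruncateB lines maxLines := by
  unfold pvTruncateA pvTruncateB
  split_ifs with h
  · rfl
  · have hne : lines.take maxLines ≠ [] := by
      intro hnil
      rcases List.take_eq_nil_iff.mp hnil with h' | h'
      · omega
      · rw [h'] at h; simp at h
    rw [pvJoin_append_singleton ['\n'] _ _ hne]
    simp [List.append_assoc]

theorem filter_listing_py_spec : Claim_equal_filter_listing_py := by
  intro output _
  unfold Spec_filter_listing_py filter_listing_py filter_listing_py_alt
  by_cases h0 : (PySem.Chars.strip output.toList).isEmpty = true
  · simp [h0]
  · simp only [h0, Bool.false_eq_true, if_false]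
    set lines := ((PySem.Chars.splitlines output.toList).filter
        (fun l => !(PySem.Chars.strip l).isEmpty)).map PySem.Chars.rstrip with hl
    by_cases h1 : lines.length ≤ 30
    · simp [h1]
    · simp only [if_neg h1]
      rw [pvStepA_eq]
      set ps := (pvClassify lines).1 with hps0
      set pl := (pvClassify lines).2 with hpl0
      have hplain : lines.filter pvIsPlain = pl := (pvClassify_snd lines).symm
      have hpairs : (lines.filter (fun l => !pvIsPlain l)).map pvRSplit2 = ps :=
        (pvClassify_fst lines).symm
      simp only [List.nil_append, hplain, hpairs]
      set dirs := ps.foldl (fun d p => d.modify p.1 [] (· ++ [p.2])) PySem.Dict.empty with hd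
      have hnd : dirs.keys.Nodup := by
        rw [hd]
        exact PySem.Dict.nodup_keys_foldl_modify_key ps Prod.fst [] _ _
          (by rw [PySem.Dict.keys_empty]; exact List.nodup_nil)
      have hkeys : dirs.keys = PySem.Set.ofList (ps.map (fun q => q.1)) := by
        rw [hd, PySem.Dict.keys_foldl_modify_key, PySem.Dict.keys_empty, PySem.Set.update_nil_left]
      have hgetD : ∀ k, dirs.getD k [] = (ps.filter (fun q => q.1 == k)).map (fun q => q.2) :=
        fun k => by rw [hd, PySem.Dict.getD_foldl_modify_append, PySem.Dict.getD_empty]; rfl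
      have hitems : dirs.items =
          (PySem.Set.ofList (ps.map (fun q => q.1))).map (fun k => (k, dirs.getD k [])) := by
        rw [← hkeys]; exact PySem.Dict.items_eq_map_keys dirs hnd []
      by_cases h2 : (lines.filter (fun l => !pvIsPlain l)).isEmpty = true
      · have hpe : ps = [] := by
          rw [← hpairs, List.isEmpty_iff.mp h2]; rfl
        have hie : dirs.items = [] := by simp [hitems, hpe, PySem.Set.ofList]
        simp only [hie, h2, List.isEmpty_nil, if_true]
        rw [pvTruncate_eq lines 30 (by omega)]
      · have hpsne : ps ≠ [] := by
          rw [← hpairs]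
          simpa using h2
        have hne2 : PySem.Set.ofList (ps.map (fun q => q.1)) ≠ [] := by
          intro hnil
          rcases List.exists_cons_of_ne_nil hpsne with ⟨p, tl, hc⟩
          have hm : p.1 ∈ PySem.Set.ofList (ps.map (fun q => q.1)) :=
            (PySem.Set.mem_ofList _ _).mpr (List.mem_map_of_mem (by rw [hc]; simp))
          rw [hnil] at hm
          simp at hm
        have hine : dirs.items.isEmpty = false := by
          rw [hitems]
          rcases List.exists_cons_of_ne_nil hne2 with ⟨a, as, hx⟩
          rw [hx]; rfl
        simp only [hine, h2, Bool.false_eq_true, if_false]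
        -- the sorted distinct keys
        have hksp : List.Pairwise (· < ·)
            (PySem.List.sorted (PySem.Set.ofList (ps.map (fun q => q.1))) (fun x => x)) := by
          rw [pvSortedCongr _ LinearOrder.toDecidableLT]
          exact PySem.List.sorted_ofList_pairwise_lt _
        -- A side: sorted(dirs.items()) is the key-ordered item list
        have hperm : (((PySem.List.sorted (PySem.Set.ofList (ps.map (fun q => q.1)))
            (fun x => x))).map (fun k => (k, dirs.getD k []))).Perm dirs.items := by
          rw [hitems]
          exact (PySem.List.sorted_perm _ _ _).map _
        have hpw : List.Pairwise (fun a b : List Char × List (List Char) => a.1 < b.1)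
            ((PySem.List.sorted (PySem.Set.ofList (ps.map (fun q => q.1)))
              (fun x => x)).map (fun k => (k, dirs.getD k []))) :=
          List.Pairwise.map _ (fun a b hab => hab) hksp
        have hsorted : PySem.List.sorted dirs.items (fun p => p.1) =
            (PySem.List.sorted (PySem.Set.ofList (ps.map (fun q => q.1)))
              (fun x => x)).map (fun k => (k, dirs.getD k [])) := by
          rw [pvSortedCongr _ LinearOrder.toDecidableLT]
          exact PySem.List.sorted_eq_of_perm_of_pairwise_lt dirs.items _ (fun p => p.1) hperm hpw
        -- B side: the run scan over the stably sorted pairs gives the same groups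
        have hLpw : (PySem.List.sorted ps (fun p => p.1)).Pairwise
            (fun a b => a.1 ≤ b.1) := by
          rw [pvSortedCongr _ LinearOrder.toDecidableLT]
          exact PySem.List.sorted_pairwise ps (fun p => p.1)
        have hmemsorted : ∀ q : List Char × List Char,
            q ∈ PySem.List.sorted ps (fun p => p.1) ↔ q ∈ ps := by
          intro q
          exact PySem.List.mem_sorted _ _ _ q
        have hmemks : ∀ kk, kk ∈ PySem.List.sorted (PySem.Set.ofList (ps.map (fun q => q.1)))
            (fun x => x) ↔ kk ∈ (PySem.List.sorted ps (fun p => p.1)).map Prod.fst := by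
          intro kk
          have h1 : kk ∈ PySem.List.sorted (PySem.Set.ofList (ps.map (fun q => q.1)))
              (fun x => x) ↔ kk ∈ PySem.Set.ofList (ps.map (fun q => q.1)) :=
            PySem.List.mem_sorted _ _ _ kk
          rw [h1, PySem.Set.mem_ofList]
          constructor
          · intro hk
            rcases List.mem_map.mp hk with ⟨q, hq, hqk⟩
            exact List.mem_map.mpr ⟨q, (hmemsorted q).mpr hq, hqk⟩
          · intro hk
            rcases List.mem_map.mp hk with ⟨q, hq, hqk⟩
            exact List.mem_map.mpr ⟨q, (hmemsorted q).mp hq, hqk⟩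
        have hgroups : pvGroups (PySem.List.sorted ps (fun p => p.1))
            = (PySem.List.sorted (PySem.Set.ofList (ps.map (fun q => q.1))) (fun x => x)).map
                (fun k => (k, dirs.getD k [])) := by
          rw [pvGroups_eq (PySem.List.sorted (PySem.Set.ofList (ps.map (fun q => q.1)))
            (fun x => x)) _ hksp hmemks hLpw]
          exact List.map_congr_left (fun k _ => by
            rw [pvSorted_filter_key ps k, ← hgetD k])
        rw [hsorted, pvFoldl_emitA, hgroups]
        by_cases h3 : pl.isEmpty = true
        · have : pl = [] := by simpa using h3
          simp [this]
        · simp [h3]
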